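-- pv_equiv track=rewrite | github.com/mltn123/cognitivemaps | cogmap/__init__.py | error_message
-- ===== SOURCE A (Python) =====
-- def error_message(player, values):
--     for i in ["medium_","nachrichten_"]:
--         filterdict =  dict(filter(lambda item: i in item[0], values.items()))
--         if not any(filterdict.values()):
--             k = []
--             if i == "medium_":
--                 k = "ein Medium"
--             elif i == "nachrichten_":
--                 k = "eine Art von Nachrichten"
--             return 'Geben Sie bitte mindestens ' + k + " an."
-- ===== SOURCE B (Python) =====
-- def error_message(player, values):
--     has_medium = False
--     has_nachrichten = False
--     for key, val in values.items():
--         if "medium_" in key and val: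
--             has_medium = True
--         if "nachrichten_" in key and val:
--             has_nachrichten = True
--     if not has_medium:
--         return 'Geben Sie bitte mindestens ein Medium an.'
--     if not has_nachrichten:
--         return 'Geben Sie bitte mindestens eine Art von Nachrichten an.'
-- ===== Notes on version B (the rewrite author's own statement) =====
-- stated objective: simpler
-- what changed: Replaces A's loop over the two prefixes, each building a filtered dict and scanning its values with any(), by a single pass over values.items() that OR-accumulates two booleans, then branches in the original order.
import Mathlib
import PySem

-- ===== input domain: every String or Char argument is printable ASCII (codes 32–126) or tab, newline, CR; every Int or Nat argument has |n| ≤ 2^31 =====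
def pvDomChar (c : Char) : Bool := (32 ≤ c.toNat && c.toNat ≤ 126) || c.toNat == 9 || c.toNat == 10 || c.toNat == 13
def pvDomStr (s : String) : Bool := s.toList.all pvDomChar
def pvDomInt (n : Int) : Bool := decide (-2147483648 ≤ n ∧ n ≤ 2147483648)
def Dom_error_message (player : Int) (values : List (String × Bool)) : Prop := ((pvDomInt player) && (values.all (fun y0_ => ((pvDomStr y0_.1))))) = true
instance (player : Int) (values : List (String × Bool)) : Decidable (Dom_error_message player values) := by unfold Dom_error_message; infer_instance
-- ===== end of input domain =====

-- B merges A's two filter-a-dict-then-any passes into one flag-building scan; objective: simpler.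

-- ===== PORT A =====
-- the body of A's 'for i in [...]' loop, recursing over the literal prefix list
def emLoopA (values : List (String × Bool)) : List String → Option String
  | [] => none
  | i :: rest =>
    let filterdict := PySem.Dict.ofList (values.filter (fun item => PySem.Str.isIn i item.1))
    if !(filterdict.values.any (fun v => v)) then
      -- Python's k starts as []; i is always one of the two literals, so the fallthrough
      -- (where Python would raise TypeError on '+') is unreachable; "" stands in for it
      let k := if i = "medium_" then "ein Medium"
               else if i = "nachrichten_" then "eine Art von Nachrichten" else ""
      some ("Geben Sie bitte mindestens " ++ k ++ " an.")
    else emLoopA values rest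

def error_message (player : Int) (values : List (String × Bool)) : Option String :=
  emLoopA values ["medium_", "nachrichten_"]

-- ===== PORT B =====
def error_message_alt (player : Int) (values : List (String × Bool)) : Option String :=
  let flags := values.foldl
    (fun (s : Bool × Bool) kv =>
      (s.1 || (PySem.Str.isIn "medium_" kv.1 && kv.2),
       s.2 || (PySem.Str.isIn "nachrichten_" kv.1 && kv.2)))
    (false, false)
  if !flags.1 then some "Geben Sie bitte mindestens ein Medium an."
  else if !flags.2 then some "Geben Sie bitte mindestens eine Art von Nachrichten an."
  else none

-- ===== PRECONDITION & SPEC =====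
-- 'values' models a Python dict[str, bool]; an association list with duplicate keys
-- represents no dict, so exactly those lists are excluded (A is never called on them).
def Pre_error_message (player : Int) (values : List (String × Bool)) : Prop :=
  (values.map Prod.fst).Nodup
instance (player : Int) (values : List (String × Bool)) : Decidable (Pre_error_message player values) := by unfold Pre_error_message; infer_instance

def pvWitness_error_message : Int × (List (String × Bool)) :=
  (0, [("medium_tv", true), ("nachrichten_gut", true)])

def Spec_error_message (player : Int) (values : List (String × Bool)) (out : Option String) : Prop := out = error_message_alt player values
instance (player : Int) (values : List (String × Bool)) (out : Option String) : Decidable (Spec_error_message player values out) := by unfold Spec_error_message; infer_instance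

-- ===== CLAIM (what is proved, stated in full; the proofs are below) =====
def Claim_equal_error_message : Prop := ∀ (player : Int) (values : List (String × Bool)), Dom_error_message player values → Pre_error_message player values → Spec_error_message player values (error_message player values)

-- ===== LEMMAS AND PROOFS =====

-- with pairwise-distinct keys, dict(filtered pairs) keeps exactly those pairs
lemma ofList_items_of_nodup (l : List (String × Bool)) (h : (l.map Prod.fst).Nodup) :
    (PySem.Dict.ofList l).items = l := by
  have := PySem.Dict.items_foldl_insert_fresh (l := l) (k := Prod.fst) (v := Prod.snd)
    (d := PySem.Dict.empty) (by simp [PySem.Dict.contains_empty]) h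
  simpa using this

-- A's test on prefix i equals B's accumulated flag for i
lemma any_filter_snd (l : List (String × Bool)) (i : String)
    (h : (l.map Prod.fst).Nodup) :
    (PySem.Dict.ofList (l.filter (fun item => PySem.Str.isIn i item.1))).values.any (fun v => v)
      = l.any (fun kv => PySem.Str.isIn i kv.1 && kv.2) := by
  have hnd : ((l.filter (fun item => PySem.Str.isIn i item.1)).map Prod.fst).Nodup :=
    (h.sublist ((List.filter_sublist (l := l)).map Prod.fst))
  rw [PySem.Dict.values, ofList_items_of_nodup _ hnd]
  simp [List.any_map, List.any_filter]

-- the two-accumulator fold computes the two 'any's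
lemma flags_eq (l : List (String × Bool)) :
    l.foldl (fun (s : Bool × Bool) kv =>
      (s.1 || (PySem.Str.isIn "medium_" kv.1 && kv.2),
       s.2 || (PySem.Str.isIn "nachrichten_" kv.1 && kv.2))) (false, false)
    = (l.any (fun kv => PySem.Str.isIn "medium_" kv.1 && kv.2),
       l.any (fun kv => PySem.Str.isIn "nachrichten_" kv.1 && kv.2)) := by
  suffices h : ∀ (a b : Bool), l.foldl (fun (s : Bool × Bool) kv =>
      (s.1 || (PySem.Str.isIn "medium_" kv.1 && kv.2),
       s.2 || (PySem.Str.isIn "nachrichten_" kv.1 && kv.2))) (a, b)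
      = (a || l.any (fun kv => PySem.Str.isIn "medium_" kv.1 && kv.2),
         b || l.any (fun kv => PySem.Str.isIn "nachrichten_" kv.1 && kv.2)) by
    simpa using h false false
  induction l with
  | nil => simp
  | cons x t ih => intro a b; rw [List.foldl_cons, ih]; simp [Bool.or_assoc]

-- ===== VERDICT (by name: the statement is the Claim_ definition above) =====
theorem error_message_spec : Claim_equal_error_message := by
  intro player values _ hpre
  unfold Spec_error_message error_message error_message_alt
  by_cases h1 : values.any (fun kv => PySem.Str.isIn "medium_" kv.1 && kv.2)
  · by_cases h2 : values.any (fun kv => PySem.Str.isIn "nachrichten_" kv.1 && kv.2)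
    · simp only [emLoopA, flags_eq, any_filter_snd values _ hpre, h1, h2]
      rfl
    · simp only [emLoopA, flags_eq, any_filter_snd values _ hpre, h1, h2]
      rfl
  · simp only [emLoopA, flags_eq, any_filter_snd values _ hpre, h1]
    rfl
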